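-- pv_equiv track=rewrite | github.com/tichalik/repair | repair.py | string_to_symbol_list
-- ===== SOURCE A (Python) =====
-- def string_to_symbol_list(string):
--     last_symbol = 0
--     symbol_list = []
--     char_to_symbol_dict = {}
--
--     for x in string:
--         if x not in char_to_symbol_dict:
--             char_to_symbol_dict[x] = last_symbol
--             last_symbol += 1
--         symbol_list.append(char_to_symbol_dict[x])
--
--     return (symbol_list, char_to_symbol_dict)
-- ===== SOURCE B (Python) =====
-- def string_to_symbol_list(string):
--     # Each character's symbol is a closed form: the number of distinct characters
--     # in the prefix strictly before its first occurrence.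
--     symbol_list = [len(set(string[:string.index(x)])) for x in string]
--     char_to_symbol_dict = dict(zip(string, symbol_list))
--     return (symbol_list, char_to_symbol_dict)
-- ===== Notes on version B (the rewrite author's own statement) =====
-- stated objective: alternative
-- what changed: A's single stateful loop (running counter, conditional dict insert, append) is replaced by a closed-form per-character formula: each character's symbol is the number of distinct characters before its first occurrence (len(set(string[:string.index(x)]))), and the dict is assembled afterwards from zip(string, symbol_list); it trades A's linear pass for a stateless quadratic formula.
import Mathlib
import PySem

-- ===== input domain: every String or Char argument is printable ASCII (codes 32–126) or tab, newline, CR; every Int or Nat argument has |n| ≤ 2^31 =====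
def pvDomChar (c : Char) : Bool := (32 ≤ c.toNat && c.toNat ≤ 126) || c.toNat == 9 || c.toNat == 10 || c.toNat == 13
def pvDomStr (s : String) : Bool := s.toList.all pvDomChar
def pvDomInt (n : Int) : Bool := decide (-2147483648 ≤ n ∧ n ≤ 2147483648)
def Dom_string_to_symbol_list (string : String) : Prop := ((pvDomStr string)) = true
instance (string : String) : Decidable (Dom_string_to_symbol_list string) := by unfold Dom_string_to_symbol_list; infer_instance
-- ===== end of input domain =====

-- B replaces A's stateful counter loop by a closed-form per-character formula (symbol =
-- number of distinct characters before the first occurrence) plus a dict built from zip;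
-- alternative decomposition, not faster (B is quadratic).


-- a one-character Python string, used as dict key by both ports
def pvKey (c : Char) : String := String.ofList [c]

-- ===== PORT A =====
-- loop body of A: conditionally assign a fresh symbol, then append dict[x]
def pvStepA (st : Int × List Int × PySem.Dict String Int) (x : Char) :
    Int × List Int × PySem.Dict String Int :=
  let st' := if st.2.2.contains (pvKey x) = false
             then (st.1 + 1, st.2.1, st.2.2.insert (pvKey x) st.1)
             else st
  (st'.1, st'.2.1 ++ [(st'.2.2.get? (pvKey x)).getD 0], st'.2.2)

def string_to_symbol_list (string : String) : List Int × (List (String × Int)) :=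
  let st := string.toList.foldl pvStepA (0, [], PySem.Dict.empty)
  (st.2.1, st.2.2.items)

-- ===== PORT B =====
-- len(set(string[:string.index(x)])) — x is always a character of the string, so
-- string.index(x) never raises; the '.getD 0' only unwraps the guaranteed 'some'.
def pvSym (l : List Char) (x : Char) : Int :=
  ((PySem.Set.ofList (PySem.List.slice l none
      (some (((PySem.List.index? l x).getD 0 : Nat) : Int)))).length : Int)

def string_to_symbol_list_alt (string : String) : List Int × (List (String × Int)) :=
  let l := string.toList
  let symbol_list := l.map (fun x => pvSym l x)
  let char_to_symbol_dict := PySem.Dict.ofList ((l.map pvKey).zip symbol_list)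
  (symbol_list, char_to_symbol_dict.items)

-- ===== PRECONDITION & SPEC =====
def Spec_string_to_symbol_list (string : String) (out : List Int × (List (String × Int))) : Prop := out = string_to_symbol_list_alt string
instance (string : String) (out : List Int × (List (String × Int))) : Decidable (Spec_string_to_symbol_list string out) := by unfold Spec_string_to_symbol_list; infer_instance

-- ===== CLAIM (what is proved, stated in full; the proofs are below) =====
def Claim_equal_string_to_symbol_list : Prop := ∀ (string : String), Dom_string_to_symbol_list string → Spec_string_to_symbol_list string (string_to_symbol_list string)

-- ===== LEMMAS AND PROOFS =====

theorem pvKey_inj {a b : Char} (h : pvKey a = pvKey b) : a = b := by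
  have := congrArg String.toList h
  simpa [pvKey] using this

-- proof-side helper: the dict A builds, described by first-seen order
def pvDictB (l : List Char) : PySem.Dict String Int :=
  PySem.Dict.ofList ((PySem.List.enumerate (PySem.List.dedup l) 0).map
    (fun p => (pvKey p.2, p.1)))

theorem ofList_eq_foldl (ps : List (String × Int)) :
    PySem.Dict.ofList ps = ps.foldl (fun d p => d.insert p.1 p.2) PySem.Dict.empty := rfl

theorem dedup_append_singleton (l : List Char) (c : Char) :
    PySem.List.dedup (l ++ [c]) =
      if c ∈ l then PySem.List.dedup l else PySem.List.dedup l ++ [c] := by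
  simp only [PySem.List.dedup_eq_ofList, PySem.Set.ofList_append_singleton,
    PySem.Set.add_eq_ite, PySem.Set.mem_ofList]

theorem keys_dictB (l : List Char) :
    (pvDictB l).keys = (PySem.List.dedup l).map pvKey := by
  unfold pvDictB
  rw [ofList_eq_foldl, PySem.Dict.keys_foldl_insert_key
    (l := (PySem.List.enumerate (PySem.List.dedup l) 0).map (fun p => (pvKey p.2, p.1)))
    (key := fun q => q.1) (f := fun d q => q.2) (d := (PySem.Dict.empty : PySem.Dict String Int))]
  have hmap : ((PySem.List.enumerate (PySem.List.dedup l) 0).map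
      (fun p => (pvKey p.2, p.1))).map (fun q => q.1)
      = (PySem.List.dedup l).map pvKey := by
    rw [List.map_map]
    calc (PySem.List.enumerate (PySem.List.dedup l) 0).map
          ((fun q : String × Int => q.1) ∘ (fun p : Int × Char => (pvKey p.2, p.1)))
        = ((PySem.List.enumerate (PySem.List.dedup l) 0).map (·.2)).map pvKey := by
          rw [List.map_map]; rfl
      _ = (PySem.List.dedup l).map pvKey := by rw [PySem.List.map_snd_enumerate]
  rw [hmap]
  have hnd : ((PySem.List.dedup l).map pvKey).Nodup :=
    (PySem.List.nodup_dedup l).map (fun a b h => pvKey_inj h)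
  rw [PySem.Dict.keys_empty, PySem.Set.update_nil_left]
  exact PySem.Set.ofList_eq_self_of_nodup _ hnd

theorem contains_dictB (l : List Char) (c : Char) :
    (pvDictB l).contains (pvKey c) = true ↔ c ∈ l := by
  rw [PySem.Dict.contains_iff_mem_keys, keys_dictB]
  constructor
  · rintro h
    rcases List.mem_map.mp h with ⟨a, ha, hk⟩
    rw [← pvKey_inj hk]
    exact (PySem.List.mem_dedup _ _).mp ha
  · intro h
    exact List.mem_map.mpr ⟨c, (PySem.List.mem_dedup _ _).mpr h, rfl⟩

theorem dictB_append_singleton (l : List Char) (c : Char) :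
    pvDictB (l ++ [c]) =
      if c ∈ l then pvDictB l
      else (pvDictB l).insert (pvKey c) ((PySem.List.dedup l).length : Int) := by
  by_cases hc : c ∈ l
  · rw [if_pos hc]
    unfold pvDictB
    rw [dedup_append_singleton, if_pos hc]
  · rw [if_neg hc]
    unfold pvDictB
    rw [dedup_append_singleton, if_neg hc,
      PySem.List.enumerate_append, List.map_append,
      ofList_eq_foldl, ofList_eq_foldl, List.foldl_append]
    simp [PySem.List.enumerate]

theorem get?_dictB_stable (l : List Char) (c x : Char) (hx : x ∈ l) :
    (pvDictB (l ++ [c])).get? (pvKey x) = (pvDictB l).get? (pvKey x) := by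
  rw [dictB_append_singleton]
  by_cases hc : c ∈ l
  · rw [if_pos hc]
  · have hne : pvKey x ≠ pvKey c := fun h => hc (pvKey_inj h ▸ hx)
    rw [if_neg hc, PySem.Dict.get?_insert_of_ne _ _ hne]

-- pvSym only looks at the prefix up to the first occurrence, so appending is stable
theorem pvSym_stable (l : List Char) (c x : Char) (hx : x ∈ l) :
    pvSym (l ++ [c]) x = pvSym l x := by
  unfold pvSym
  rw [PySem.List.index?_append_of_mem _ hx]
  rcases (PySem.List.index?_isSome_iff (xs := l) (v := x)).mpr hx |> Option.isSome_iff_exists.mp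
    with ⟨k, hk⟩
  rcases PySem.List.getElem_of_index?_eq_some hk with ⟨hklt, _, _⟩
  rw [hk]
  simp only [Option.getD_some, PySem.List.slice_to_natCast]
  rw [List.take_append_of_le_length (le_of_lt hklt)]

theorem pvSym_new (l : List Char) (c : Char) (hc : c ∉ l) :
    pvSym (l ++ [c]) c = ((PySem.List.dedup l).length : Int) := by
  unfold pvSym
  rw [PySem.List.index?_append_singleton_self _ _ hc]
  simp only [Option.getD_some, PySem.List.slice_to_natCast]
  rw [List.take_left]
  simp [PySem.List.dedup_eq_ofList]

-- the value A's dict stores at a character IS B's closed form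
theorem get?_dictB_eq_sym (l : List Char) (x : Char) (hx : x ∈ l) :
    (pvDictB l).get? (pvKey x) = some (pvSym l x) := by
  induction l using List.reverseRecOn with
  | nil => cases hx
  | append_singleton l c ih =>
    by_cases hxl : x ∈ l
    · rw [get?_dictB_stable l c x hxl, pvSym_stable l c x hxl, ih hxl]
    · have hxc : x = c := by
        rcases List.mem_append.mp hx with h | h
        · exact absurd h hxl
        · simpa using h
      subst hxc
      rw [dictB_append_singleton, if_neg hxl, PySem.Dict.get?_insert_self,
        pvSym_new l x hxl]

-- B's dict: a fold of inserts keyed by pvKey, last write wins but all writes agree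
theorem get?_foldl_insert_key (l : List Char) (f : Char → Int)
    (d : PySem.Dict String Int) (x : Char) :
    (l.foldl (fun d c => d.insert (pvKey c) (f c)) d).get? (pvKey x)
      = if x ∈ l then some (f x) else d.get? (pvKey x) := by
  induction l using List.reverseRecOn generalizing d with
  | nil => simp
  | append_singleton l c ih =>
    rw [List.foldl_append, List.foldl_cons, List.foldl_nil,
      PySem.Dict.get?_insert, ih]
    by_cases hxc : x = c
    · subst hxc; simp
    · have : pvKey x ≠ pvKey c := fun h => hxc (pvKey_inj h)
      simp [this, hxc]

theorem keys_foldl_insert_key' (l : List Char) (f : Char → Int) :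
    (l.foldl (fun d c => d.insert (pvKey c) (f c)) PySem.Dict.empty).keys
      = (PySem.List.dedup l).map pvKey := by
  rw [PySem.Dict.keys_foldl_insert_key (key := fun c => pvKey c) (f := fun d c => f c),
    PySem.Dict.keys_empty, PySem.Set.update_nil_left]
  induction l using List.reverseRecOn with
  | nil => rfl
  | append_singleton l c ih =>
    rw [List.map_append, List.map_singleton, PySem.Set.ofList_append_singleton,
      dedup_append_singleton, ih]
    by_cases hc : c ∈ l
    · rw [if_pos hc, PySem.Set.add_of_mem]
      exact List.mem_map.mpr ⟨c, (PySem.List.mem_dedup _ _).mpr hc, rfl⟩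
    · rw [if_neg hc, PySem.Set.add_of_not_mem, List.map_append, List.map_singleton]
      intro hmem
      rcases List.mem_map.mp hmem with ⟨a, ha, hk⟩
      exact hc ((pvKey_inj hk) ▸ (PySem.List.mem_dedup _ _).mp ha)

-- B's zip-built dict equals A's first-seen dict
theorem dictC_eq_dictB (l : List Char) :
    PySem.Dict.ofList ((l.map pvKey).zip (l.map (fun x => pvSym l x))) = pvDictB l := by
  rw [List.zip_map', ofList_eq_foldl, List.foldl_map]
  apply PySem.Dict.ext
  have hkeysC := keys_foldl_insert_key' l (fun x => pvSym l x)
  have hkeysB := keys_dictB l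
  have hndk : ((PySem.List.dedup l).map pvKey).Nodup :=
    (PySem.List.nodup_dedup l).map (fun a b h => pvKey_inj h)
  rw [PySem.Dict.items_eq_map_keys _ (hkeysC ▸ hndk) 0,
      PySem.Dict.items_eq_map_keys _ (hkeysB ▸ hndk) 0, hkeysC, hkeysB]
  apply List.map_congr_left
  intro k hk
  rcases List.mem_map.mp hk with ⟨a, ha, rfl⟩
  have hal : a ∈ l := (PySem.List.mem_dedup _ _).mp ha
  rw [PySem.Dict.getD_eq_get?_getD, PySem.Dict.getD_eq_get?_getD,
    get?_foldl_insert_key, if_pos hal, get?_dictB_eq_sym l a hal]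

theorem loopA_eq (l : List Char) :
    l.foldl pvStepA (0, [], PySem.Dict.empty) =
      (((PySem.List.dedup l).length : Int),
       l.map (fun x => ((pvDictB l).get? (pvKey x)).getD 0),
       pvDictB l) := by
  induction l using List.reverseRecOn with
  | nil => rfl
  | append_singleton l c ih =>
    rw [List.foldl_append, ih, List.foldl_cons, List.foldl_nil]
    have hmap : (l ++ [c]).map (fun x => ((pvDictB (l ++ [c])).get? (pvKey x)).getD 0)
        = l.map (fun x => ((pvDictB l).get? (pvKey x)).getD 0)
          ++ [((pvDictB (l ++ [c])).get? (pvKey c)).getD 0] := by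
      rw [List.map_append]
      congr 1
      exact List.map_congr_left (fun x hx => by rw [get?_dictB_stable l c x hx])
    by_cases hc : c ∈ l
    · have hcont : (pvDictB l).contains (pvKey c) = true := (contains_dictB l c).mpr hc
      have hlen : PySem.List.dedup (l ++ [c]) = PySem.List.dedup l := by
        rw [dedup_append_singleton, if_pos hc]
      have hd : pvDictB (l ++ [c]) = pvDictB l := by
        rw [dictB_append_singleton, if_pos hc]
      rw [hmap, hd, hlen]
      simp [pvStepA, hcont]
    · have hcont : (pvDictB l).contains (pvKey c) = false := by
        rcases Bool.eq_false_or_eq_true ((pvDictB l).contains (pvKey c)) with h | h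
        · exact absurd ((contains_dictB l c).mp h) hc
        · exact h
      have hlen : PySem.List.dedup (l ++ [c]) = PySem.List.dedup l ++ [c] := by
        rw [dedup_append_singleton, if_neg hc]
      have hd : pvDictB (l ++ [c]) =
          (pvDictB l).insert (pvKey c) ((PySem.List.dedup l).length : Int) := by
        rw [dictB_append_singleton, if_neg hc]
      rw [hmap, hd, hlen]
      simp [pvStepA, hcont, PySem.Dict.get?_insert_self]

-- ===== VERDICT (by name: the statement is the Claim_ definition above) =====
theorem string_to_symbol_list_spec : Claim_equal_string_to_symbol_list := by
  intro s _
  unfold Spec_string_to_symbol_list string_to_symbol_list string_to_symbol_list_alt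
  dsimp only
  rw [loopA_eq, dictC_eq_dictB]
  refine Prod.ext ?_ rfl
  exact List.map_congr_left (fun x hx => by
    rw [get?_dictB_eq_sym s.toList x hx, Option.getD_some])
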